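-- pv_equiv track=rewrite | github.com/icdev-ai/icdev | tools/simulation/coa_generator.py | _sum_tshirt_hours
-- ===== SOURCE A (Python) =====
-- _TSHIRT_HOURS = {
--     "XS": 8,
--     "S": 24,
--     "M": 80,
--     "L": 200,
--     "XL": 480,
--     "XXL": 960,
-- }
--
-- def _sum_tshirt_hours(items):
--     """Sum estimated hours from T-shirt sizes of decomposition items."""
--     total = 0
--     breakdown = {}
--     for item in items:
--         size = item.get("t_shirt_size") or "M"
--         hours = _TSHIRT_HOURS.get(size, 80)
--         total += hours
--         breakdown[size] = breakdown.get(size, 0) + 1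
--     return total, breakdown
-- ===== SOURCE B (Python) =====
-- _TSHIRT_HOURS = {
--     "XS": 8,
--     "S": 24,
--     "M": 80,
--     "L": 200,
--     "XL": 480,
--     "XXL": 960,
-- }
--
-- def _sum_tshirt_hours(items):
--     """Materialise the sizes list, dedup it, and derive breakdown/total from counts."""
--     sizes = [item.get("t_shirt_size") or "M" for item in items]
--     breakdown = {s: sizes.count(s) for s in dict.fromkeys(sizes)}
--     total = sum(_TSHIRT_HOURS.get(s, 80) * c for s, c in breakdown.items())
--     return total, breakdown
-- ===== Notes on version B (the rewrite author's own statement) =====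
-- stated objective: alternative
-- what changed: A accumulates total and breakdown dict together in one inline loop; B builds the flat list of sizes, dedups it with dict.fromkeys, forms the breakdown via sizes.count per distinct size, and totals hours[size]*count in a final pass - no incremental dict updates at all.
import Mathlib
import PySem

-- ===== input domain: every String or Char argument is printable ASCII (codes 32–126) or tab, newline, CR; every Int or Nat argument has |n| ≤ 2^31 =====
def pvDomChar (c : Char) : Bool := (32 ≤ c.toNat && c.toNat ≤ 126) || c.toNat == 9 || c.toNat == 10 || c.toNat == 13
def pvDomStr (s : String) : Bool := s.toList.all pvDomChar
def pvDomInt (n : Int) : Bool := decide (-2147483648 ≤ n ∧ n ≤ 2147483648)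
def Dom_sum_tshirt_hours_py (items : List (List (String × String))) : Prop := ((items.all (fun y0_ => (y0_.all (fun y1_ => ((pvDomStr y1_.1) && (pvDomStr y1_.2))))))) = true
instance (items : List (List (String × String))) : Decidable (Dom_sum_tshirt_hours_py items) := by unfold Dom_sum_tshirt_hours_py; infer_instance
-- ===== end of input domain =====

-- B replaces A's single accumulating loop with a list-of-sizes + dedup + per-size count pipeline (alternative decomposition, same result).

-- module constant _TSHIRT_HOURS
def tshirtHours : PySem.Dict String Int :=
  PySem.Dict.ofList [("XS", 8), ("S", 24), ("M", 80), ("L", 200), ("XL", 480), ("XXL", 960)]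

-- item.get("t_shirt_size") or "M"  (shared expression of both Pythons)
def pvItemSize (item : List (String × String)) : String :=
  match (PySem.Dict.ofList item).get? "t_shirt_size" with
  | some s => if s == "" then "M" else s
  | none => "M"

-- ===== PORT A =====
def sum_tshirt_hours_py (items : List (List (String × String))) : Int × (List (String × Int)) :=
  let st := items.foldl
    (fun (st : Int × PySem.Dict String Int) item =>
      let size := pvItemSize item
      let hours := tshirtHours.getD size 80
      (st.1 + hours, st.2.insert size (st.2.getD size 0 + 1)))
    (0, PySem.Dict.empty)
  (st.1, st.2.items)

-- ===== PORT B =====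
def sum_tshirt_hours_py_alt (items : List (List (String × String))) : Int × (List (String × Int)) :=
  let sizes := items.map pvItemSize
  let breakdown := (PySem.List.dedup sizes).map (fun s => (s, (PySem.List.count sizes s : Int)))
  let total := (breakdown.map (fun p => tshirtHours.getD p.1 80 * p.2)).sum
  (total, breakdown)

-- ===== PRECONDITION & SPEC =====
def Spec_sum_tshirt_hours_py (items : List (List (String × String))) (out : Int × (List (String × Int))) : Prop := out = sum_tshirt_hours_py_alt items
instance (items : List (List (String × String))) (out : Int × (List (String × Int))) : Decidable (Spec_sum_tshirt_hours_py items out) := by unfold Spec_sum_tshirt_hours_py; infer_instance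

-- ===== CLAIM (what is proved, stated in full; the proofs are below) =====
def Claim_equal_sum_tshirt_hours_py : Prop := ∀ (items : List (List (String × String))), Dom_sum_tshirt_hours_py items → Spec_sum_tshirt_hours_py items (sum_tshirt_hours_py items)

-- ===== LEMMAS AND PROOFS =====

-- A's combined loop splits into the running total and a counting fold over the sizes.
lemma foldA_split (items : List (List (String × String))) (t : Int) (d : PySem.Dict String Int) :
    items.foldl
      (fun (st : Int × PySem.Dict String Int) item =>
        let size := pvItemSize item
        let hours := tshirtHours.getD size 80
        (st.1 + hours, st.2.insert size (st.2.getD size 0 + 1)))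
      (t, d)
    = (t + ((items.map (fun it => tshirtHours.getD (pvItemSize it) 80)).sum),
       items.foldl
        (fun (d : PySem.Dict String Int) item =>
          let size := pvItemSize item
          d.insert size (d.getD size 0 + 1)) d) := by
  induction items generalizing t d with
  | nil => simp
  | cons x xs ih => simp [ih, add_assoc]

-- summing f over a list = summing f k * count k over its first-occurrence dedup
lemma sum_dedup_mul_count (f : String → Int) (xs : List String) :
    ((PySem.Set.ofList xs).map (fun k => f k * (xs.count k : Int))).sum
      = (xs.map f).sum := by
  rw [← List.sum_toFinset _ (PySem.Set.nodup_ofList xs)]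
  have hfin : (PySem.Set.ofList xs).toFinset = xs.toFinset := by
    ext a; simp [PySem.Set.mem_ofList]
  rw [hfin, Finset.sum_list_map_count xs f]
  refine Finset.sum_congr rfl fun m _ => ?_
  simp [mul_comm]

theorem sum_tshirt_hours_py_eq_alt (items : List (List (String × String))) :
    sum_tshirt_hours_py items = sum_tshirt_hours_py_alt items := by
  unfold sum_tshirt_hours_py sum_tshirt_hours_py_alt
  rw [foldA_split]
  have hfold : items.foldl
      (fun (d : PySem.Dict String Int) item =>
        let size := pvItemSize item
        d.insert size (d.getD size 0 + 1)) PySem.Dict.empty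
      = PySem.Dict.counter (items.map pvItemSize) := by
    rw [← PySem.Dict.foldl_insert_getD_add_one_eq_counter, List.foldl_map]
  simp only [hfold, PySem.Dict.items_counter, PySem.List.dedup_eq_ofList,
    PySem.List.count_eq]
  refine Prod.ext ?_ rfl
  simp only [zero_add, List.map_map, Function.comp_def]
  have := sum_dedup_mul_count (fun k => tshirtHours.getD k 80) (items.map pvItemSize)
  simp only [List.map_map, Function.comp_def] at this ⊢
  exact this.symm

-- ===== VERDICT (by name: the statement is the Claim_ definition above) =====
theorem sum_tshirt_hours_py_spec : Claim_equal_sum_tshirt_hours_py := by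
  intro items _
  exact sum_tshirt_hours_py_eq_alt items
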